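-- pv_equiv track=rewrite | github.com/mickhornung-oss/local-image-ai | python/text_service.py | is_translation_request
-- ===== SOURCE A (Python) =====
-- def is_translation_request(prompt: str) -> bool:
--     normalized = f" {prompt.lower()} "
--     markers = (
--         " translate ",
--         " translation ",
--         " uebersetze ",
--         " übersetze ",
--         " ins englische ",
--         " auf englisch ",
--         " into english ",
--         " in english ",
--         " ins spanische ",
--         " auf spanisch ",
--         " into spanish ",
--         " in spanish ",
--         " ins franzoesische ",
--         " auf franzoesisch ",
--         " into french ",
--         " in french ",
--     )
--     return any(marker in normalized for marker in markers)
-- ===== SOURCE B (Python) =====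
-- _MARKERS = (
--     " translate ",
--     " translation ",
--     " uebersetze ",
--     " übersetze ",
--     " ins englische ",
--     " auf englisch ",
--     " into english ",
--     " in english ",
--     " ins spanische ",
--     " auf spanisch ",
--     " into spanish ",
--     " in spanish ",
--     " ins franzoesische ",
--     " auf franzoesisch ",
--     " into french ",
--     " in french ",
-- )
--
-- # Each marker as its sequence of words; an index from first word to the token
-- # sequences starting with it, so the scan only tests sequences whose first word
-- # matches the current word.
-- _INDEX = {}
-- for _toks in (m.split() for m in _MARKERS):
--     _INDEX.setdefault(_toks[0], []).append(_toks)
--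
--
-- def is_translation_request(prompt: str) -> bool:
--     words = prompt.lower().split(' ')
--     for i, w in enumerate(words):
--         for toks in _INDEX.get(w, ()):
--             if words[i:i + len(toks)] == toks:
--                 return True
--     return False
-- ===== Notes on version B (the rewrite author's own statement) =====
-- stated objective: alternative
-- what changed: B tokenizes the lowercased prompt into space-separated words and slides a window over the word list, matching each marker as a sequence of word tokens via an index keyed by first word, instead of A's per-marker substring search in the space-padded string.
import Mathlib
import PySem

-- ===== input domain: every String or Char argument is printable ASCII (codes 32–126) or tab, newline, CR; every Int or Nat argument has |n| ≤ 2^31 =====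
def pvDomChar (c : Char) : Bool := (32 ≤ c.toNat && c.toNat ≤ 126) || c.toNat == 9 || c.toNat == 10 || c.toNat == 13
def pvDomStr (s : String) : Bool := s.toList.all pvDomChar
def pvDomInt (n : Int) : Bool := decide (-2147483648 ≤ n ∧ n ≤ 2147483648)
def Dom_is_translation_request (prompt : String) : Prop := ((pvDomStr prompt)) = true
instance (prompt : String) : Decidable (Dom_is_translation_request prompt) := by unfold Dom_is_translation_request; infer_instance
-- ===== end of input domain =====

-- B tokenizes the lowercased prompt into space-separated words and matches each marker
-- as a sequence of word tokens (first-word index + window compare) instead of A's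
-- per-marker substring search in the space-padded string; objective: alternative algorithm.

-- ===== PORT A =====
-- A's marker tuple, in order.
def pvMarkersA : List String :=
  [" translate ", " translation ", " uebersetze ", " übersetze ",
   " ins englische ", " auf englisch ", " into english ", " in english ",
   " ins spanische ", " auf spanisch ", " into spanish ", " in spanish ",
   " ins franzoesische ", " auf franzoesisch ", " into french ", " in french "]

def is_translation_request (prompt : String) : Bool :=
  let normalized : List Char := ' ' :: PySem.Chars.lower prompt.toList ++ [' ']
  pvMarkersA.any (fun marker => PySem.Chars.isIn marker.toList normalized)

-- ===== PORT B =====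
-- each marker split into its words (m.split() of Source B, precomputed)
def pvMarkersTok : List (List (List Char)) :=
  [["translate".toList], ["translation".toList], ["uebersetze".toList], ["übersetze".toList],
   ["ins".toList, "englische".toList], ["auf".toList, "englisch".toList],
   ["into".toList, "english".toList], ["in".toList, "english".toList],
   ["ins".toList, "spanische".toList], ["auf".toList, "spanisch".toList],
   ["into".toList, "spanish".toList], ["in".toList, "spanish".toList],
   ["ins".toList, "franzoesische".toList], ["auf".toList, "franzoesisch".toList],
   ["into".toList, "french".toList], ["in".toList, "french".toList]]

-- Source B's _INDEX: first word ↦ token sequences starting with it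
-- (toks[0] on the constant non-empty token lists is ported as headD [])
def pvIndex : PySem.Dict (List Char) (List (List (List Char))) :=
  pvMarkersTok.foldl (fun d toks => d.modify (toks.headD []) [] (fun b => b ++ [toks])) PySem.Dict.empty

-- Source B's scan loop: at each word, try the token sequences indexed under it
def pvScanWords : List (List Char) → Bool
  | [] => false
  | w :: rest =>
      (pvIndex.getD w []).any (fun toks => (w :: rest).take toks.length == toks) || pvScanWords rest

def is_translation_request_alt (prompt : String) : Bool :=
  pvScanWords (PySem.Chars.splitOn (PySem.Chars.lower prompt.toList) " ".toList)

-- ===== PRECONDITION & SPEC =====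
def Spec_is_translation_request (prompt : String) (out : Bool) : Prop := out = is_translation_request_alt prompt
instance (prompt : String) (out : Bool) : Decidable (Spec_is_translation_request prompt out) := by unfold Spec_is_translation_request; infer_instance

-- ===== CLAIM (what is proved, stated in full; the proofs are below) =====
def Claim_equal_is_translation_request : Prop := ∀ (prompt : String), Dom_is_translation_request prompt → Spec_is_translation_request prompt (is_translation_request prompt)

-- ===== LEMMAS AND PROOFS =====

lemma pvModifyHead_id {α : Type} (l : List α) : List.modifyHead (fun x => x) l = l := by
  cases l <;> rfl

-- PySem's splitOn on a single space is Mathlib's List.splitOn ' '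
lemma pvSplitOn_go_eq (fuel : Nat) : ∀ (l cur : List Char) (acc : List (List Char)),
    l.length ≤ fuel →
    PySem.Chars.splitOn.go [' '] fuel l cur acc
      = acc.reverse ++ (l.splitOn ' ').modifyHead (cur.reverse ++ ·) := by
  induction fuel with
  | zero =>
      intro l cur acc h
      have hl : l = [] := List.length_eq_zero_iff.mp (Nat.le_zero.mp h)
      subst hl
      simp [PySem.Chars.splitOn.go, List.splitOn]
  | succ fuel ih =>
      intro l cur acc h
      cases l with
      | nil => simp [PySem.Chars.splitOn.go, List.splitOn]
      | cons c rest =>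
          rw [PySem.Chars.splitOn.go]
          by_cases hc : c = ' '
          · subst hc
            have hpre : [' '].isPrefixOf (' ' :: rest) = true := by
              simp [List.isPrefixOf]
            rw [if_pos hpre]
            simp only [List.length_singleton, List.drop_one, List.tail_cons]
            rw [ih rest [] (cur.reverse :: acc) (by simpa using Nat.le_of_succ_le_succ h)]
            simp [List.splitOn, List.splitOnP_cons, pvModifyHead_id]
          · have hpre : [' '].isPrefixOf (c :: rest) = false := by
              simp only [List.isPrefixOf, Bool.and_eq_false_iff]
              exact Or.inl (by simpa using fun h => hc h.symm)
            rw [if_neg (by simp [hpre])]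
            rw [ih rest (c :: cur) acc (by simpa using Nat.le_of_succ_le_succ h)]
            obtain ⟨hd, tl, hht⟩ := List.exists_cons_of_ne_nil (List.splitOnP_ne_nil (· == ' ') rest)
            simp [List.splitOn, List.splitOnP_cons, hc, hht]

lemma pvSplitOn_space (cs : List Char) :
    PySem.Chars.splitOn cs [' '] = cs.splitOn ' ' := by
  rw [PySem.Chars.splitOn, pvSplitOn_go_eq (cs.length + 1) cs [] [] (Nat.le_succ _)]
  obtain ⟨hd, tl, hht⟩ := List.exists_cons_of_ne_nil (List.splitOnP_ne_nil (· == ' ') cs)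
  simp [List.splitOn] at hht ⊢
  simp [hht]

-- every piece of splitOn ' ' is space-free
lemma pvSplitOn_space_free (cs : List Char) : ∀ w ∈ cs.splitOn ' ', ' ' ∉ w := by
  induction cs with
  | nil => simp [List.splitOn]
  | cons c rest ih =>
      intro w hw
      simp only [List.splitOn, List.splitOnP_cons] at hw ih
      by_cases hc : c = ' '
      · subst hc
        simp at hw
        rcases hw with hw | hw
        · simp [hw]
        · exact ih w hw
      · simp [hc] at hw
        obtain ⟨hd, tl, hht⟩ := List.exists_cons_of_ne_nil (List.splitOnP_ne_nil (· == ' ') rest)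
        rw [hht] at hw
        simp at hw
        rcases hw with hw | hw
        · subst hw
          intro hmem
          rcases List.mem_cons.mp hmem with h | h
          · exact hc h.symm
          · exact ih hd (by simp [hht]) h
        · exact ih w (by simp [hht, hw])

-- each word followed by one space, concatenated
def pvT : List (List Char) → List Char
  | [] => []
  | w :: rest => w ++ ' ' :: pvT rest

lemma pvT_splitOn (cs : List Char) : pvT (cs.splitOn ' ') = cs ++ [' '] := by
  induction cs with
  | nil => simp [List.splitOn, pvT]
  | cons c rest ih =>
      simp only [List.splitOn, List.splitOnP_cons] at ih ⊢
      by_cases hc : c = ' '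
      · subst hc
        simp [pvT, ih]
      · obtain ⟨hd, tl, hht⟩ := List.exists_cons_of_ne_nil (List.splitOnP_ne_nil (· == ' ') rest)
        rw [hht] at ih ⊢
        simp [hc, pvT] at ih ⊢
        simp [ih]

lemma pvPrefix_step (a : List Char) : ∀ (b X Y : List Char), ' ' ∉ a → ' ' ∉ b →
    ((a ++ ' ' :: X) <+: (b ++ ' ' :: Y) ↔ a = b ∧ X <+: Y) := by
  induction a with
  | nil =>
      intro b X Y _ hb
      cases b with
      | nil => simp [List.cons_prefix_cons]
      | cons d b' =>
          simp only [List.nil_append, List.cons_append, List.cons_prefix_cons]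
          constructor
          · rintro ⟨h, -⟩; exact absurd h.symm (by intro hd; exact hb (hd ▸ List.mem_cons_self))
          · rintro ⟨h, -⟩; exact absurd h (by simp)
  | cons c a' ih =>
      intro b X Y ha hb
      cases b with
      | nil =>
          simp only [List.cons_append, List.nil_append, List.cons_prefix_cons]
          constructor
          · rintro ⟨h, -⟩; exact absurd h (by intro hh; exact ha (hh ▸ List.mem_cons_self))
          · rintro ⟨h, -⟩; exact absurd h (by simp)
      | cons d b' =>
          simp only [List.cons_append, List.cons_prefix_cons]
          rw [ih b' X Y (fun h => ha (List.mem_cons_of_mem _ h)) (fun h => hb (List.mem_cons_of_mem _ h))]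
          constructor
          · rintro ⟨h1, h2, h3⟩; exact ⟨by rw [h1, h2], h3⟩
          · rintro ⟨h1, h2⟩
            injection h1 with h1a h1b
            exact ⟨h1a, h1b, h2⟩

lemma pvT_prefix (ts : List (List Char)) : ∀ (ws : List (List Char)),
    (∀ t ∈ ts, ' ' ∉ t) → (∀ w ∈ ws, ' ' ∉ w) →
    (pvT ts <+: pvT ws ↔ ts <+: ws) := by
  induction ts with
  | nil => intro ws _ _; simp [pvT]
  | cons t ts' ih =>
      intro ws hts hws
      cases ws with
      | nil =>
          simp only [pvT]
          constructor
          · intro h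
            have := List.IsPrefix.length_le h
            simp at this
          · intro h
            have := List.IsPrefix.length_le h
            simp at this
      | cons w ws' =>
          simp only [pvT]
          rw [pvPrefix_step t w (pvT ts') (pvT ws') (hts t List.mem_cons_self) (hws w List.mem_cons_self),
              ih ws' (fun x hx => hts x (List.mem_cons_of_mem _ hx)) (fun x hx => hws x (List.mem_cons_of_mem _ hx))]
          exact (List.cons_prefix_cons).symm

lemma pvSkip_word (w : List Char) : ∀ (Y Z : List Char), ' ' ∉ w →
    ((' ' :: Y) <:+: (w ++ ' ' :: Z) ↔ (' ' :: Y) <:+: (' ' :: Z)) := by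
  induction w with
  | nil => intro Y Z _; simp
  | cons c w' ih =>
      intro Y Z hw
      rw [List.cons_append, List.infix_cons_iff]
      constructor
      · rintro (h | h)
        · exact absurd (List.cons_prefix_cons.mp h).1
            (by intro hh; exact hw (hh ▸ List.mem_cons_self))
        · exact (ih Y Z (fun h' => hw (List.mem_cons_of_mem _ h'))).mp h
      · intro h
        exact Or.inr ((ih Y Z (fun h' => hw (List.mem_cons_of_mem _ h'))).mpr h)

lemma pvMain_infix (ws : List (List Char)) : ∀ (ts : List (List Char)),
    ts ≠ [] → (∀ t ∈ ts, ' ' ∉ t) → (∀ w ∈ ws, ' ' ∉ w) →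
    ((' ' :: pvT ts) <:+: (' ' :: pvT ws) ↔ ts <:+: ws) := by
  induction ws with
  | nil =>
      intro ts hne hts _
      simp only [pvT]
      constructor
      · intro h
        have hlen := List.IsInfix.length_le h
        cases ts with
        | nil => exact absurd rfl hne
        | cons t ts' => simp [pvT] at hlen
      · intro h
        exact absurd (List.infix_nil.mp h) hne
  | cons w ws' ih =>
      intro ts hne hts hws
      have hws' : ∀ x ∈ ws', ' ' ∉ x := fun x hx => hws x (List.mem_cons_of_mem _ hx)
      calc (' ' :: pvT ts) <:+: (' ' :: pvT (w :: ws'))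
          ↔ (' ' :: pvT ts) <+: (' ' :: pvT (w :: ws')) ∨ (' ' :: pvT ts) <:+: pvT (w :: ws') := List.infix_cons_iff
        _ ↔ ts <+: (w :: ws') ∨ ts <:+: ws' := by
            constructor
            · rintro (h | h)
              · exact Or.inl ((pvT_prefix ts (w :: ws') hts hws).mp (List.cons_prefix_cons.mp h).2)
              · exact Or.inr ((ih ts hne hts hws').mp
                  ((pvSkip_word w _ _ (hws w List.mem_cons_self)).mp h))
            · rintro (h | h)
              · exact Or.inl (List.cons_prefix_cons.mpr ⟨rfl, (pvT_prefix ts (w :: ws') hts hws).mpr h⟩)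
              · exact Or.inr ((pvSkip_word w _ _ (hws w List.mem_cons_self)).mpr
                  ((ih ts hne hts hws').mpr h))
        _ ↔ ts <:+: (w :: ws') := (List.infix_cons_iff).symm

-- the index bucket of w holds exactly the marker token lists with first word w
lemma pvIndex_getD (w : List Char) (ts : List (List Char)) :
    ts ∈ pvIndex.getD w [] ↔ ts ∈ pvMarkersTok ∧ ts.headD [] = w := by
  have hfold : pvIndex
      = (pvMarkersTok.map (fun t => (t.headD [], t))).foldl
          (fun d p => d.modify p.1 [] (fun b => b ++ [p.2])) PySem.Dict.empty := by
    rw [List.foldl_map]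
    rfl
  rw [hfold, PySem.Dict.getD_foldl_modify_append]
  simp only [List.filter_map, List.map_map, List.mem_append, List.mem_map, List.mem_filter,
    Function.comp]
  constructor
  · rintro (h | ⟨a, ⟨ha, hw⟩, rfl⟩)
    · rw [show (PySem.Dict.empty : PySem.Dict (List Char) (List (List (List Char)))).getD w [] = []
          from PySem.Dict.getD_of_not_contains _ _ (by rfl)] at h
      cases h
    · exact ⟨ha, by simpa using hw⟩
  · rintro ⟨hts, hw⟩
    exact Or.inr ⟨ts, ⟨hts, by simpa using hw⟩, rfl⟩

-- every marker token list is non-empty (so its first word determines its bucket)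
lemma pvMarkersTok_ne_nil : ∀ ts ∈ pvMarkersTok, ts ≠ [] := by decide

-- the scan finds a match iff some marker token list is an infix of the word list
lemma pvScan_iff (ws : List (List Char)) :
    pvScanWords ws = true ↔ ∃ ts ∈ pvMarkersTok, ts <:+: ws := by
  induction ws with
  | nil =>
      constructor
      · intro h; exact absurd h (by simp [pvScanWords])
      · rintro ⟨ts, hts, h⟩
        exact ((pvMarkersTok_ne_nil ts hts) (List.infix_nil.mp h)).elim
  | cons w rest ih =>
      simp only [pvScanWords, Bool.or_eq_true, ih, List.any_eq_true, beq_iff_eq]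
      constructor
      · rintro (⟨ts, hts, h⟩ | ⟨ts, hts, h⟩)
        · obtain ⟨htok, -⟩ := (pvIndex_getD w ts).mp hts
          exact ⟨ts, htok, ((List.prefix_iff_eq_take).mpr h.symm).isInfix⟩
        · exact ⟨ts, hts, h.trans (List.suffix_cons w rest).isInfix⟩
      · rintro ⟨ts, hts, h⟩
        rw [List.infix_cons_iff] at h
        rcases h with h | h
        · refine Or.inl ⟨ts, (pvIndex_getD w ts).mpr ⟨hts, ?_⟩, ?_⟩
          · cases ts with
            | nil => exact absurd rfl (pvMarkersTok_ne_nil [] hts)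
            | cons x ts' => simpa using (List.cons_prefix_cons.mp h).1
          · exact ((List.prefix_iff_eq_take).mp h).symm
        · exact Or.inr ⟨ts, hts, h⟩

-- each marker string is its token list rendered with a leading space and one space after each word
lemma pvMarkers_eq : pvMarkersA.map String.toList = pvMarkersTok.map (fun ts => ' ' :: pvT ts) := by
  decide

-- tokens are space-free
lemma pvTok_space_free : ∀ ts ∈ pvMarkersTok, ∀ t ∈ ts, ' ' ∉ t := by decide

-- ===== VERDICT (by name: the statement is the Claim_ definition above) =====
theorem is_translation_request_spec : Claim_equal_is_translation_request := by
  intro prompt _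
  unfold Spec_is_translation_request is_translation_request is_translation_request_alt
  have hsp : (" ".toList : List Char) = [' '] := rfl
  rw [hsp, pvSplitOn_space]
  set L := PySem.Chars.lower prompt.toList with hL
  set ws := L.splitOn ' ' with hws
  rw [Bool.eq_iff_iff, pvScan_iff]
  have hpad : (' ' :: L ++ [' '] : List Char) = ' ' :: pvT ws := by
    rw [hws, pvT_splitOn]; rfl
  constructor
  · intro h
    simp only [List.any_eq_true] at h
    obtain ⟨m, hm, hIn⟩ := h
    rw [PySem.Chars.isIn_iff_infix] at hIn
    have hmem : m.toList ∈ pvMarkersA.map String.toList := List.mem_map_of_mem hm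
    rw [pvMarkers_eq] at hmem
    obtain ⟨ts, hts, hmt⟩ := List.mem_map.mp hmem
    rw [← hmt, hpad] at hIn
    exact ⟨ts, hts, (pvMain_infix ws ts (pvMarkersTok_ne_nil ts hts)
      (pvTok_space_free ts hts) (pvSplitOn_space_free L)).mp hIn⟩
  · rintro ⟨ts, hts, h⟩
    have hinf : (' ' :: pvT ts) <:+: (' ' :: pvT ws) :=
      (pvMain_infix ws ts (pvMarkersTok_ne_nil ts hts)
        (pvTok_space_free ts hts) (pvSplitOn_space_free L)).mpr h
    have hmem : (' ' :: pvT ts) ∈ pvMarkersA.map String.toList := by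
      rw [pvMarkers_eq]; exact List.mem_map_of_mem hts
    obtain ⟨m, hm, hmt⟩ := List.mem_map.mp hmem
    simp only [List.any_eq_true]
    exact ⟨m, hm, (PySem.Chars.isIn_iff_infix _ _).mpr (by rw [hmt, hpad]; exact hinf)⟩
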